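-- pv_equiv track=rewrite | github.com/JKeskinen/DiscordBot | komento_koodit/commands_tulokset.py | _format_club_success_announcement
-- ===== SOURCE A (Python) =====
-- from typing import Any, Dict, List, Optional
--
-- def _format_club_success_announcement(detections: List[Dict[str, Any]]) -> str:
--     """Build aggregated Lakeus Disc Golf announcement text from detections.
--
--     Outputs a block with header, then Viikkokisat and PDGA sections listing
--     players with counts and win counts, e.g.:
--     __Lakeus Disc Golf ry Palkintosijat__
--     __Viikkokisat__
--     1) Janne Sinisalmi (3)kpl, joista voittoja (1)kpl
--     ...
--     __PDGA__
--     ...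
--     """
--     if not detections:
--         return ""
--
--     # Group detections into viikkokisat vs pdga by event_name heuristic
--     viikka = []
--     pdga = []
--     for d in detections:
--         en = str(d.get('event_name') or "").lower()
--         if 'pdga' in en:
--             pdga.append(d)
--         else:
--             viikka.append(d)
--
--     def aggregate(lst: List[Dict[str, Any]]) -> List[Dict[str, Any]]:
--         by_player: Dict[str, Dict[str, Any]] = {}
--         for it in lst:
--             key = str(it.get('metrix_id') or (it.get('name') or '')).strip() or (it.get('name') or '').lower()
--             entry = by_player.get(key) or {'name': it.get('name') or '', 'count': 0, 'wins': 0}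
--             entry['count'] = entry.get('count', 0) + 1
--             try:
--                 pos = int(it.get('position') or 0)
--             except Exception:
--                 pos = 0
--             if pos == 1:
--                 entry['wins'] = entry.get('wins', 0) + 1
--             by_player[key] = entry
--         # Return sorted list by count desc, then wins desc, then name
--         return sorted(by_player.values(), key=lambda x: (-int(x.get('count', 0)), -int(x.get('wins', 0)), x.get('name', '')))
--
--     vi_agg = aggregate(viikka)
--     pd_agg = aggregate(pdga)
--
--     out: List[str] = []
--     out.append("__Lakeus Disc Golf ry Palkintosijat__")
--
--     if vi_agg:
--         out.append("__Viikkokisat__")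
--         for i, p in enumerate(vi_agg, start=1):
--             name = p.get('name') or ''
--             cnt = int(p.get('count', 0))
--             wins = int(p.get('wins', 0))
--             out.append(f"{i}) {name} {cnt}kpl, joista voittoja {wins}kpl")
--         out.append("")
--
--     if pd_agg:
--         out.append("__PDGA__")
--         for i, p in enumerate(pd_agg, start=1):
--             name = p.get('name') or ''
--             cnt = int(p.get('count', 0))
--             wins = int(p.get('wins', 0))
--             out.append(f"{i}) {name} {cnt}kpl, joista voittoja {wins}kpl")
--
--     return "\n".join(out)
-- ===== SOURCE B (Python) =====
-- def _format_club_success_announcement(detections):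
--     """Aggregation by counting: take the distinct player keys in first-seen
--     order and compute each player's count/wins by direct scans over the
--     section's items (no per-player accumulator record dict)."""
--     if not detections:
--         return ""
--
--     def name_of(d):
--         return d.get('name') or ''
--
--     def key_of(d):
--         return str(d.get('metrix_id') or name_of(d)).strip() or name_of(d).lower()
--
--     def is_win(d):
--         try:
--             return int(d.get('position') or 0) == 1
--         except Exception:
--             return False
--
--     def section_lines(items):
--         keys = [key_of(d) for d in items]
--         rows = [(next(name_of(d) for d, kk in zip(items, keys) if kk == k),
--                  keys.count(k),
--                  sum(1 for d, kk in zip(items, keys) if kk == k and is_win(d)))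
--                 for k in dict.fromkeys(keys)]
--         rows.sort(key=lambda r: (-r[1], -r[2], r[0]))
--         return ["%d) %s %dkpl, joista voittoja %dkpl" % (i, n, c, w)
--                 for i, (n, c, w) in enumerate(rows, 1)]
--
--     vi = section_lines([d for d in detections
--                         if 'pdga' not in str(d.get('event_name') or '').lower()])
--     pd = section_lines([d for d in detections
--                         if 'pdga' in str(d.get('event_name') or '').lower()])
--     blocks = ["__Lakeus Disc Golf ry Palkintosijat__"]
--     if vi:
--         blocks += ["__Viikkokisat__", *vi, ""]
--     if pd:
--         blocks += ["__PDGA__", *pd]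
--     return "\n".join(blocks)
-- ===== Notes on version B (the rewrite author's own statement) =====
-- stated objective: alternative
-- what changed: Replaces A's per-player accumulator dict (a fold merging a running {name,count,wins} record per detection) with aggregation by counting: B lists the distinct player keys in first-seen order (dict.fromkeys) and computes each player's name, count and win count by direct scans (next over zip, keys.count, a 0/1 generator sum) over the section's filtered items, with no mutable record accumulator at all.
import Mathlib
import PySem

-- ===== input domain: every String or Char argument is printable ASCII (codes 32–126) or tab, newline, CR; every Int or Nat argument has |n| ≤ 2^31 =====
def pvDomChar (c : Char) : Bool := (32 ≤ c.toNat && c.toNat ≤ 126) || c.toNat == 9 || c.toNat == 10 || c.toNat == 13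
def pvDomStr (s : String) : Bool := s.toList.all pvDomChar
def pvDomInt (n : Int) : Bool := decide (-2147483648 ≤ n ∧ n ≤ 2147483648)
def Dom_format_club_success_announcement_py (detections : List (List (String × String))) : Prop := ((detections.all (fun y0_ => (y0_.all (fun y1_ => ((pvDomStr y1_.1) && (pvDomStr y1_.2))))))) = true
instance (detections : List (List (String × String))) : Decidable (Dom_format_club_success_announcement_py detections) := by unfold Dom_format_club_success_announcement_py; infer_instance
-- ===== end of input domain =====

-- B replaces A's per-player accumulator dict (a fold merging a record per detection) by
-- aggregation-by-counting: the distinct player keys in first-seen order, each player's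
-- count and wins computed by direct scans of the section's items (objective: alternative).

-- Shared builtin-level helpers (Python builtins / expressions both sources use verbatim):
-- dict.get on the association list (first match, per the type convention)
def pvGet? (d : List (String × String)) (k : String) : Option String :=
  (d.find? (fun p => p.1 == k)).map (·.2)
-- Python `x or default` for an optional string (empty string is falsy)
def pvOr (o : Option String) (dflt : String) : String :=
  match o with
  | some s => if s = "" then dflt else s
  | none => dflt
-- d.get('name') or ''
def pvName (d : List (String × String)) : String := pvOr (pvGet? d "name") ""
-- str(d.get('metrix_id') or (d.get('name') or '')).strip() or (d.get('name') or '').lower()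
def pvKey (d : List (String × String)) : String :=
  let k := PySem.Str.strip (pvOr (pvGet? d "metrix_id") (pvName d))
  if k = "" then PySem.Str.lower (pvName d) else k
-- `int(d.get('position') or 0)` with the `except: 0` both sources wrap around it
def pvPos (d : List (String × String)) : Int :=
  match pvGet? d "position" with
  | none => 0
  | some s => if s = "" then 0 else (PySem.Int.ofStr? s).getD 0
-- pos == 1 (A's win test; B's is_win)
def pvWin (d : List (String × String)) : Bool := pvPos d == 1
-- 'pdga' in str(d.get('event_name') or "").lower()
def pvIsPdga (d : List (String × String)) : Bool :=
  PySem.Str.isIn "pdga" (PySem.Str.lower (pvOr (pvGet? d "event_name") ""))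
-- Python string `<` = lexicographic comparison of code points (exact on the ASCII domain)
def pvCharsLt : List Char → List Char → Bool
  | _, [] => false
  | [], _ :: _ => true
  | a :: as, b :: bs => a.toNat < b.toNat || (a.toNat == b.toNat && pvCharsLt as bs)
-- strict `<` of the Python sort keys (-count, -wins, name) — tuple comparison spelled out
-- componentwise because Lean's `<` on products is not Python's lexicographic order
def playerLt (a b : String × Int × Int) : Bool :=
  b.2.1 < a.2.1 || (b.2.1 == a.2.1 &&
    (b.2.2 < a.2.2 || (b.2.2 == a.2.2 && pvCharsLt a.1.toList b.1.toList)))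
-- Python's stable sort with key (-count, -wins, name): PySem.List.sorted's own stable
-- insertion-sort shape (cf. PySem.List.sorted_eq_foldl_insertBy) with that key order;
-- this ports A's sorted(…, key=…) and B's list.sort(key=…) alike
def sortPlayers (xs : List (String × Int × Int)) : List (String × Int × Int) :=
  xs.foldl (fun acc x => PySem.List.insertBy playerLt x acc) []

-- ===== PORT A =====
-- body of A's partition loop over detections
def pvASplitStep (acc : List (List (String × String)) × List (List (String × String)))
    (d : List (String × String)) :
    List (List (String × String)) × List (List (String × String)) :=
  if pvIsPdga d then (acc.1, acc.2 ++ [d]) else (acc.1 ++ [d], acc.2)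

-- f"{i}) {name} {cnt}kpl, joista voittoja {wins}kpl"
def pvALine (i : Int) (p : String × Int × Int) : String :=
  PySem.Int.toStr i ++ ") " ++ p.1 ++ " " ++ PySem.Int.toStr p.2.1 ++
    "kpl, joista voittoja " ++ PySem.Int.toStr p.2.2 ++ "kpl"

-- the merged entry: entry = by_player.get(key) or {...}; count += 1; if pos == 1: wins += 1
def pvAEntry (prev : Option (String × Int × Int)) (it : List (String × String)) :
    String × Int × Int :=
  let entry := prev.getD (pvName it, (0 : Int), (0 : Int))
  let entry := (entry.1, entry.2.1 + 1, entry.2.2)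
  if pvWin it then (entry.1, entry.2.1, entry.2.2 + 1) else entry

-- body of `for it in lst:` inside A's aggregate: by_player[key] = entry
def pvAStep (byp : PySem.Dict String (String × Int × Int)) (it : List (String × String)) :
    PySem.Dict String (String × Int × Int) :=
  byp.insert (pvKey it) (pvAEntry (byp.get? (pvKey it)) it)

def pvAAggregate (lst : List (List (String × String))) : List (String × Int × Int) :=
  sortPlayers ((lst.foldl pvAStep PySem.Dict.empty).values)

def format_club_success_announcement_py (detections : List (List (String × String))) : String :=
  if detections = [] then "" else
  let parts := detections.foldl pvASplitStep ([], [])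
  let vi_agg := pvAAggregate parts.1
  let pd_agg := pvAAggregate parts.2
  let out : List String := ["__Lakeus Disc Golf ry Palkintosijat__"]
  let out := if vi_agg = [] then out else
    ((PySem.List.enumerate vi_agg 1).foldl (fun o ip => o ++ [pvALine ip.1 ip.2])
      (out ++ ["__Viikkokisat__"])) ++ [""]
  let out := if pd_agg = [] then out else
    (PySem.List.enumerate pd_agg 1).foldl (fun o ip => o ++ [pvALine ip.1 ip.2])
      (out ++ ["__PDGA__"])
  PySem.Str.join "\n" out

-- ===== PORT B =====
-- "%d) %s %dkpl, joista voittoja %dkpl" % (i, n, c, w)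
def pvBLine (i : Int) (p : String × Int × Int) : String :=
  PySem.Int.toStr i ++ ") " ++ p.1 ++ " " ++ PySem.Int.toStr p.2.1 ++
    "kpl, joista voittoja " ++ PySem.Int.toStr p.2.2 ++ "kpl"

-- row for one distinct key k:
--   (next(name_of(d) for d, kk in zip(items, keys) if kk == k),   -- first matching item
--    keys.count(k),                                               -- count by scan
--    sum(1 for d, kk in zip(items, keys) if kk == k and is_win(d)))  -- 0/1-sum = countP
def pvBRow (items : List (List (String × String))) (keys : List String) (k : String) :
    String × Int × Int :=
  ( (match (items.zip keys).find? (fun p => p.2 == k) with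
     | some p => pvName p.1
     | none => ""),   -- next() raises if no match; unreachable: k is drawn from keys
    (PySem.List.count keys k : Int),
    ((items.zip keys).countP (fun p => p.2 == k && pvWin p.1) : Int) )

def pvBSection (items : List (List (String × String))) : List String :=
  let keys := items.map pvKey
  let rows := sortPlayers ((PySem.List.dedup keys).map (pvBRow items keys))
  (PySem.List.enumerate rows 1).map (fun ip => pvBLine ip.1 ip.2)

def format_club_success_announcement_py_alt (detections : List (List (String × String))) : String :=
  if detections = [] then "" else
  let vi := pvBSection (detections.filter (fun d => !pvIsPdga d))
  let pd := pvBSection (detections.filter pvIsPdga)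
  PySem.Str.join "\n" (["__Lakeus Disc Golf ry Palkintosijat__"]
    ++ (if vi = [] then [] else ["__Viikkokisat__"] ++ vi ++ [""])
    ++ (if pd = [] then [] else ["__PDGA__"] ++ pd))

-- ===== PRECONDITION & SPEC =====
def Spec_format_club_success_announcement_py (detections : List (List (String × String))) (out : String) : Prop := out = format_club_success_announcement_py_alt detections
instance (detections : List (List (String × String))) (out : String) : Decidable (Spec_format_club_success_announcement_py detections out) := by unfold Spec_format_club_success_announcement_py; infer_instance

-- ===== CLAIM (what is proved, stated in full; the proofs are below) =====
def Claim_equal_format_club_success_announcement_py : Prop := ∀ (detections : List (List (String × String))), Dom_format_club_success_announcement_py detections → Spec_format_club_success_announcement_py detections (format_club_success_announcement_py detections)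

-- ===== LEMMAS AND PROOFS =====

-- closed form of one aggregated player record, read off the item list directly
def rowOf (lst : List (List (String × String))) (k : String) : String × Int × Int :=
  ( (match lst.find? (fun d => pvKey d == k) with
     | some d => pvName d
     | none => ""),
    (lst.countP (fun d => pvKey d == k) : Int),
    (lst.countP (fun d => pvKey d == k && pvWin d) : Int) )

set_option maxHeartbeats 1000000 in
theorem pvAgg_get? (lst : List (List (String × String))) (k : String) :
    (lst.foldl pvAStep PySem.Dict.empty).get? k
      = if lst.any (fun d => pvKey d == k) then some (rowOf lst k) else none := by
  induction lst using List.reverseRecOn with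
  | nil => simp
  | append_singleton l x ih =>
    rw [List.foldl_append, List.foldl_cons, List.foldl_nil]
    rw [pvAStep]
    by_cases hk : k = pvKey x
    · subst hk
      rw [PySem.Dict.get?_insert_self, ih]
      by_cases ha : (l.any fun d => pvKey d == pvKey x) = true
      · rw [if_pos ha]
        have hany : ((l ++ [x]).any fun d => pvKey d == pvKey x) = true := by
          simp [List.any_append, ha]
        rw [if_pos hany]
        obtain ⟨d, hd⟩ := Option.isSome_iff_exists.mp (List.find?_isSome.mpr
          (by rcases List.any_eq_true.mp ha with ⟨d, hdm, hb⟩; exact ⟨d, hdm, hb⟩))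
        congr 1
        rw [rowOf, rowOf, List.find?_append, hd, pvAEntry]
        simp only [Option.some_or, List.countP_append, List.countP_cons, List.countP_nil,
          beq_self_eq_true, Bool.true_and, Option.getD_some]
        by_cases hw : pvWin x = true
        · simp only [hw, if_pos]
          refine Prod.ext rfl (Prod.ext ?_ ?_) <;> push_cast <;> ring
        · simp only [Bool.not_eq_true] at hw
          simp only [hw, Bool.false_eq_true, if_neg, not_false_eq_true]
          refine Prod.ext rfl (Prod.ext ?_ ?_) <;> simp
      · have hall : ∀ d ∈ l, ¬((pvKey d == pvKey x) = true) :=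
          fun d hdm hb => ha (List.any_eq_true.mpr ⟨d, hdm, hb⟩)
        rw [if_neg ha]
        have hz : l.countP (fun d => pvKey d == pvKey x) = 0 :=
          List.countP_eq_zero.mpr hall
        have hz2 : l.countP (fun d => pvKey d == pvKey x && pvWin d) = 0 :=
          List.countP_eq_zero.mpr (fun d hdm hb => hall d hdm (by simp only [Bool.and_eq_true] at hb; exact hb.1))
        have hfn : l.find? (fun d => pvKey d == pvKey x) = none :=
          List.find?_eq_none.mpr hall
        have hany : ((l ++ [x]).any fun d => pvKey d == pvKey x) = true := by
          simp [List.any_append]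
        rw [if_pos hany, rowOf, List.find?_append, hfn, pvAEntry]
        simp only [Option.none_or, List.find?_cons, beq_self_eq_true, List.countP_append,
          List.countP_cons, List.countP_nil, hz, hz2, Bool.true_and, Option.getD_none]
        by_cases hw : pvWin x = true
        · simp [hw]
        · simp only [Bool.not_eq_true] at hw
          simp [hw]
    · rw [PySem.Dict.get?_insert_of_ne _ _ hk, ih]
      have hne : (pvKey x == k) = false := by
        simpa using fun h => hk h.symm
      have hrow : rowOf (l ++ [x]) k = rowOf l k := by
        rw [rowOf, rowOf, List.find?_append, List.countP_append, List.countP_append]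
        simp [hne]
      rw [hrow]
      simp [List.any_append, hne]

theorem pvAgg_keys (lst : List (List (String × String))) :
    (lst.foldl pvAStep PySem.Dict.empty).keys = PySem.List.dedup (lst.map pvKey) := by
  have h : lst.foldl pvAStep PySem.Dict.empty
      = lst.foldl (fun d x => d.insert (pvKey x) (pvAEntry (d.get? (pvKey x)) x))
          PySem.Dict.empty := rfl
  rw [h, PySem.Dict.keys_foldl_insert_key, PySem.Dict.keys_empty,
    PySem.Set.update_nil_left, PySem.List.dedup_eq_ofList]

theorem pvAgg_nodup (lst : List (List (String × String))) :
    (lst.foldl pvAStep PySem.Dict.empty).keys.Nodup := by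
  rw [pvAgg_keys]; exact PySem.List.nodup_dedup _

theorem pvBRow_eq (lst : List (List (String × String))) (k : String) :
    pvBRow lst (lst.map pvKey) k = rowOf lst k := by
  rw [pvBRow, rowOf, ← List.map_prod_left_eq_zip, List.find?_map, List.countP_map,
    PySem.List.count_eq, List.count_eq_countP, List.countP_map]
  cases h : lst.find? (fun d => pvKey d == k) <;>
    simp only [Function.comp_def, h, Option.map_some, Option.map_none]

theorem pvValues_eq (lst : List (List (String × String))) :
    (lst.foldl pvAStep PySem.Dict.empty).values
      = (PySem.List.dedup (lst.map pvKey)).map (pvBRow lst (lst.map pvKey)) := by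
  rw [PySem.Dict.values_eq_map_keys _ (pvAgg_nodup lst) ("", (0 : Int), (0 : Int)),
    pvAgg_keys]
  refine List.map_congr_left ?_
  intro k hk
  have hmem : k ∈ lst.map pvKey := (PySem.List.mem_dedup _ _).mp hk
  have hany : lst.any (fun d => pvKey d == k) = true := by
    rcases List.mem_map.mp hmem with ⟨d, hd, rfl⟩
    exact List.any_eq_true.mpr ⟨d, hd, by simp⟩
  rw [PySem.Dict.getD_eq_get?_getD, pvAgg_get?, hany, if_pos rfl, Option.getD_some,
    pvBRow_eq]

theorem pvPartition (l : List (List (String × String)))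
    (acc : List (List (String × String)) × List (List (String × String))) :
    l.foldl pvASplitStep acc
    = (acc.1 ++ l.filter (fun d => !pvIsPdga d), acc.2 ++ l.filter pvIsPdga) := by
  induction l generalizing acc with
  | nil => simp
  | cons x xs ih =>
    rw [List.foldl_cons, ih, List.filter_cons, List.filter_cons]
    unfold pvASplitStep
    by_cases hx : pvIsPdga x = true <;> simp [hx]

theorem pvFlattenSingletons {A B : Type} (f : A → B) (l : List A) :
    (l.map (fun x => [f x])).flatten = l.map f := by
  induction l <;> simp_all

theorem pvAssemble (vi pd : List (String × Int × Int)) :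
    (let out : List String := ["__Lakeus Disc Golf ry Palkintosijat__"]
     let out := if vi = [] then out else
       ((PySem.List.enumerate vi 1).foldl (fun o ip => o ++ [pvALine ip.1 ip.2])
         (out ++ ["__Viikkokisat__"])) ++ [""]
     let out := if pd = [] then out else
       (PySem.List.enumerate pd 1).foldl (fun o ip => o ++ [pvALine ip.1 ip.2])
         (out ++ ["__PDGA__"])
     PySem.Str.join "\n" out)
    = PySem.Str.join "\n" (["__Lakeus Disc Golf ry Palkintosijat__"]
        ++ (if (PySem.List.enumerate vi 1).map (fun ip => pvBLine ip.1 ip.2) = [] then []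
            else ["__Viikkokisat__"] ++ (PySem.List.enumerate vi 1).map (fun ip => pvBLine ip.1 ip.2) ++ [""])
        ++ (if (PySem.List.enumerate pd 1).map (fun ip => pvBLine ip.1 ip.2) = [] then []
            else ["__PDGA__"] ++ (PySem.List.enumerate pd 1).map (fun ip => pvBLine ip.1 ip.2))) := by
  cases vi <;> cases pd <;>
    simp [PySem.List.enumerate_cons, pvALine, pvBLine, List.append_assoc,
      pvFlattenSingletons]

-- ===== VERDICT (by name: the statement is the Claim_ definition above) =====
theorem format_club_success_announcement_py_spec : Claim_equal_format_club_success_announcement_py := by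
  intro det _
  show format_club_success_announcement_py det = format_club_success_announcement_py_alt det
  by_cases hd : det = []
  · simp [format_club_success_announcement_py, format_club_success_announcement_py_alt, hd]
  · unfold format_club_success_announcement_py format_club_success_announcement_py_alt
      pvAAggregate pvBSection
    rw [if_neg hd, if_neg hd]
    simp only [pvPartition det ([], []), List.nil_append, pvValues_eq]
    exact pvAssemble _ _
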